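-- pv_equiv track=rewrite | github.com/ElFosco/ALEM | utility/utility.py | compute_obj_value
-- ===== SOURCE A (Python) =====
-- def compute_obj_value(solution,batch_weights):
--     weights = []
--     obj_value = 0
--     if len(batch_weights)==1:
--         weights = batch_weights[0]
--     else:
--         base_element = batch_weights[0][-2]
--         for i in range(len(solution)):
--             weights.insert(0,base_element**i)
--     for i in range(len(weights)):
--         obj_value += solution[i] * weights[i]
--     return obj_value
-- ===== SOURCE B (Python) =====
-- def compute_obj_value(solution, batch_weights):
--     if len(batch_weights) == 1:
--         return sum(s * w for s, w in zip(solution, batch_weights[0]))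
--     base = batch_weights[0][-2]
--     obj_value = 0
--     for s in solution:
--         obj_value = obj_value * base + s
--     return obj_value
-- ===== Notes on version B (the rewrite author's own statement) =====
-- stated objective: faster
-- what changed: Replaces the O(n^2) front-insertion of explicitly computed powers plus an indexed summation loop with a single Horner-scheme pass over solution (and a direct zip-sum in the single-batch case).
import Mathlib
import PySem

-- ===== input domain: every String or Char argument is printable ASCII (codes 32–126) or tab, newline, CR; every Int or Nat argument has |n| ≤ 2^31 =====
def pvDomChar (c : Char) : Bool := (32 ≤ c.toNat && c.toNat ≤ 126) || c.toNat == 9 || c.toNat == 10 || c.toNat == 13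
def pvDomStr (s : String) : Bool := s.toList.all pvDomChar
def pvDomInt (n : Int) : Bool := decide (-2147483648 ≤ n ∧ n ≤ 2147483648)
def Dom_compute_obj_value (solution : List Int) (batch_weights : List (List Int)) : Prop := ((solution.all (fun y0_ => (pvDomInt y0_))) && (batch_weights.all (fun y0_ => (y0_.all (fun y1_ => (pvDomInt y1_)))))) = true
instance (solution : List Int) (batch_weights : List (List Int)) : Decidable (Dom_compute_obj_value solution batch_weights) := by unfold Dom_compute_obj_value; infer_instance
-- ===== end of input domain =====

-- B replaces A's quadratic front-insertion of powers + indexed summation by a single O(n)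
-- Horner pass (and a direct zip-sum in the single-batch case); return value only, no mutation.

-- ===== PORT A =====
def compute_obj_value (solution : List Int) (batch_weights : List (List Int)) : Int :=
  let weights : List Int :=
    if batch_weights.length == 1 then
      (PySem.List.pyGet? batch_weights 0).getD []
    else
      let base : Int := PySem.List.pyGetD ((PySem.List.pyGet? batch_weights 0).getD []) (-2) 0
      (PySem.List.pyRange 0 (solution.length : Int) 1).foldl (fun w i => base ^ i.toNat :: w) []
  (PySem.List.pyRange 0 (weights.length : Int) 1).foldl
    (fun obj i => obj + PySem.List.pyGetD solution i 0 * PySem.List.pyGetD weights i 0) 0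

-- ===== PORT B =====
def compute_obj_value_alt (solution : List Int) (batch_weights : List (List Int)) : Int :=
  if batch_weights.length == 1 then
    ((solution.zip (batch_weights.headD [])).map (fun p => p.1 * p.2)).sum
  else
    let base : Int := PySem.List.pyGetD (batch_weights.headD []) (-2) 0
    solution.foldl (fun acc s => acc * base + s) 0

-- ===== PRECONDITION & SPEC =====
-- Pre_ excludes exactly the inputs where A raises: empty batch_weights (IndexError on
-- batch_weights[0]); a single batch row longer than solution (IndexError on solution[i]);
-- several rows with the first shorter than 2 (IndexError on batch_weights[0][-2]).
def Pre_compute_obj_value (solution : List Int) (batch_weights : List (List Int)) : Prop :=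
  batch_weights ≠ [] ∧
  (if batch_weights.length = 1 then (batch_weights.headD []).length ≤ solution.length
   else 2 ≤ (batch_weights.headD []).length)
instance (solution : List Int) (batch_weights : List (List Int)) : Decidable (Pre_compute_obj_value solution batch_weights) := by unfold Pre_compute_obj_value; infer_instance

def pvWitness_compute_obj_value : List Int × List (List Int) := ([1, 2], [[3, 4]])

def Spec_compute_obj_value (solution : List Int) (batch_weights : List (List Int)) (out : Int) : Prop := out = compute_obj_value_alt solution batch_weights
instance (solution : List Int) (batch_weights : List (List Int)) (out : Int) : Decidable (Spec_compute_obj_value solution batch_weights out) := by unfold Spec_compute_obj_value; infer_instance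

-- ===== CLAIM (what is proved, stated in full; the proofs are below) =====
def Claim_equal_compute_obj_value : Prop := ∀ (solution : List Int) (batch_weights : List (List Int)), Dom_compute_obj_value solution batch_weights → Pre_compute_obj_value solution batch_weights → Spec_compute_obj_value solution batch_weights (compute_obj_value solution batch_weights)

-- ===== LEMMAS AND PROOFS =====

-- A's 'weights.insert(0, f(i))' loop builds the reversed map.
theorem pv_foldl_cons_rev (f : Int → Int) (l : List Int) (acc : List Int) :
    l.foldl (fun w i => f i :: w) acc = (l.map f).reverse ++ acc := by
  induction l generalizing acc with
  | nil => simp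
  | cons a t ih => simp [ih]

-- A's indexed summation loop as a sum over List.range.
theorem pv_loopA (s w : List Int) :
    (PySem.List.pyRange 0 (w.length : Int) 1).foldl
      (fun obj i => obj + PySem.List.pyGetD s i 0 * PySem.List.pyGetD w i 0) 0
    = ((List.range w.length).map (fun k => s.getD k 0 * w.getD k 0)).sum := by
  rw [PySem.List.pyRange_one]
  simp [List.foldl_map, PySem.List.foldl_add]

-- index-summation equals zip-summation when w is no longer than s
theorem pv_zipsum (w s : List Int) (h : w.length ≤ s.length) :
    ((List.range w.length).map (fun k => s.getD k 0 * w.getD k 0)).sum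
    = ((s.zip w).map (fun p => p.1 * p.2)).sum := by
  induction w generalizing s with
  | nil => simp
  | cons b t ih =>
    cases s with
    | nil => simp at h
    | cons a u =>
      have h' : t.length ≤ u.length := by simpa using h
      simp [List.range_succ_eq_map, List.map_map, Function.comp_def, ← ih u h']

-- Horner's rule, with the power sum written over List.range
theorem pv_horner (s : List Int) (base c : Int) :
    s.foldl (fun acc x => acc * base + x) c
    = c * base ^ s.length
      + ((List.range s.length).map (fun k => s.getD k 0 * base ^ (s.length - 1 - k))).sum := by
  induction s generalizing c with
  | nil => simp
  | cons a t ih =>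
    simp only [List.foldl_cons, ih, List.length_cons, List.range_succ_eq_map, List.map_cons,
      List.map_map, Function.comp_def, List.sum_cons, List.getD_cons_zero, List.getD_cons_succ]
    have he : ∀ k : Nat, t.length + 1 - 1 - (k + 1) = t.length - 1 - k := by omega
    simp only [he]
    have : t.length + 1 - 1 - 0 = t.length := by omega
    rw [this, pow_succ]
    ring

theorem compute_obj_value_spec_aux (solution : List Int) (batch_weights : List (List Int))
    (hpre : Pre_compute_obj_value solution batch_weights) :
    compute_obj_value solution batch_weights = compute_obj_value_alt solution batch_weights := by
  obtain ⟨hne, hcond⟩ := hpre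
  by_cases hb : batch_weights.length = 1
  · -- single batch: weights = batch_weights[0]
    obtain ⟨w, rfl⟩ : ∃ w, batch_weights = [w] := by
      cases batch_weights with
      | nil => simp at hb
      | cons w r => cases r with
        | nil => exact ⟨w, rfl⟩
        | cons _ _ => simp at hb
    simp only [hb, if_true] at hcond
    simp only [compute_obj_value, compute_obj_value_alt, List.length_cons, List.length_nil,
      beq_self_eq_true, if_true, PySem.List.pyGet?_zero_cons, Option.getD_some, List.headD_cons]
    rw [pv_loopA]
    exact pv_zipsum w solution (by simpa using hcond)
  · -- geometric weights: Horner
    obtain ⟨w0, rest, rfl⟩ : ∃ w0 rest, batch_weights = w0 :: rest := by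
      cases batch_weights with
      | nil => exact absurd rfl hne
      | cons w0 rest => exact ⟨w0, rest, rfl⟩
    have hbne : ((w0 :: rest).length == 1) = false := by
      simpa using hb
    simp only [compute_obj_value, compute_obj_value_alt, hbne, Bool.false_eq_true, if_false,
      PySem.List.pyGet?_zero_cons, Option.getD_some, List.headD_cons]
    set base : Int := PySem.List.pyGetD w0 (-2) 0 with hbase
    set n := solution.length with hn
    have hweights : (PySem.List.pyRange 0 (n : Int) 1).foldl (fun w i => base ^ i.toNat :: w) []
        = ((List.range n).map (fun k => base ^ k)).reverse := by
      rw [PySem.List.pyRange_one, pv_foldl_cons_rev, List.append_nil]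
      congr 1
      rw [List.map_map]
      simp [Function.comp_def]
    rw [hweights]
    set wrev := ((List.range n).map fun k => base ^ k).reverse with hw
    have hlen : wrev.length = n := by simp [hw]
    have hget : ∀ k, k < n → wrev.getD k 0 = base ^ (n - 1 - k) := by
      intro k hk
      have hk' : k < wrev.length := by omega
      rw [List.getD_eq_getElem _ _ hk']
      simp [hw, List.getElem_reverse]
    rw [pv_loopA, hlen, pv_horner]
    have : ((List.range n).map fun k => solution.getD k 0 * wrev.getD k 0)
        = (List.range n).map fun k => solution.getD k 0 * base ^ (n - 1 - k) := by
      apply List.map_congr_left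
      intro k hk
      rw [hget k (List.mem_range.mp hk)]
    rw [this, hn]
    ring

-- ===== VERDICT (by name: the statement is the Claim_ definition above) =====
theorem compute_obj_value_spec : Claim_equal_compute_obj_value := by
  intro solution batch_weights _ hpre
  exact compute_obj_value_spec_aux solution batch_weights hpre
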